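-- pv_equiv track=rewrite | github.com/HermanBergstrom/TabICL_Experiments | plotting_scripts/tabiclv2_column_viz.py | _build_grouped_column_labels
-- ===== SOURCE A (Python) =====
-- def _build_grouped_column_labels(base_column_names: list[str]) -> list[str]:
-- 	n_columns = len(base_column_names)
-- 	if n_columns == 0:
-- 		return []
--
-- 	grouped_labels = []
-- 	for idx in range(n_columns):
-- 		n0 = base_column_names[idx % n_columns]
-- 		n1 = base_column_names[(idx + 1) % n_columns]
-- 		n3 = base_column_names[(idx + 3) % n_columns]
-- 		grouped_labels.append(f"{n0} | {n1} | {n3}")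
--
-- 	return grouped_labels
-- ===== SOURCE B (Python) =====
-- def _build_grouped_column_labels(base_column_names: list[str]) -> list[str]:
-- 	base = base_column_names
-- 	n = len(base)
-- 	if n == 0:
-- 		return []
-- 	s1 = 1 % n
-- 	s3 = 3 % n
-- 	r1 = base[s1:] + base[:s1]
-- 	r3 = base[s3:] + base[:s3]
-- 	return [f"{a} | {b} | {c}" for a, b, c in zip(base, r1, r3)]
-- ===== Notes on version B (the rewrite author's own statement) =====
-- stated objective: idiomatic
-- what changed: Replaces the per-index modular lookups with two precomputed rotations of the list (slice-and-concatenate) consumed in a single zip pass.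
import Mathlib
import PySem

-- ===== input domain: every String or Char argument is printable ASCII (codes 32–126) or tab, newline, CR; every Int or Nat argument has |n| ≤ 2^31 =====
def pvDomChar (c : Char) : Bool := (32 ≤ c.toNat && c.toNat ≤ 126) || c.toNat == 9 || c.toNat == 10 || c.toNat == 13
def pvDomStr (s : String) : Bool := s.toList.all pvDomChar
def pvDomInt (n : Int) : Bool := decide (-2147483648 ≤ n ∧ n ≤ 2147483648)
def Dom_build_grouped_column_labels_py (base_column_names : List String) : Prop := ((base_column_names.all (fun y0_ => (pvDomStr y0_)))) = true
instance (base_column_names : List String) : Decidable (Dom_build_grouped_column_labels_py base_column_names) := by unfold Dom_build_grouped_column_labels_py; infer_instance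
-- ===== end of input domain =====

-- B builds two rotated copies of the list and zips them with the original, instead of per-index modular lookups; idiomatic, same cost.


-- ===== PORT A =====
def build_grouped_column_labels_py (base_column_names : List String) : List String :=
  let n_columns : Int := base_column_names.length
  if n_columns = 0 then []
  else
    (PySem.List.pyRange 0 n_columns 1).foldl (fun grouped_labels idx =>
      let n0 := PySem.List.pyGetD base_column_names (PySem.Int.mod idx n_columns) ""
      let n1 := PySem.List.pyGetD base_column_names (PySem.Int.mod (idx + 1) n_columns) ""
      let n3 := PySem.List.pyGetD base_column_names (PySem.Int.mod (idx + 3) n_columns) ""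
      grouped_labels ++ [n0 ++ " | " ++ n1 ++ " | " ++ n3]) []

-- ===== PORT B =====
def build_grouped_column_labels_py_alt (base_column_names : List String) : List String :=
  let n : Int := base_column_names.length
  if n = 0 then []
  else
    let s1 := PySem.Int.mod 1 n
    let s3 := PySem.Int.mod 3 n
    let r1 := PySem.List.slice base_column_names (some s1) none ++
              PySem.List.slice base_column_names none (some s1)
    let r3 := PySem.List.slice base_column_names (some s3) none ++
              PySem.List.slice base_column_names none (some s3)
    (base_column_names.zip (r1.zip r3)).map (fun p =>
      p.1 ++ " | " ++ p.2.1 ++ " | " ++ p.2.2)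

-- ===== PRECONDITION & SPEC =====
def Spec_build_grouped_column_labels_py (base_column_names : List String) (out : List String) : Prop := out = build_grouped_column_labels_py_alt base_column_names
instance (base_column_names : List String) (out : List String) : Decidable (Spec_build_grouped_column_labels_py base_column_names out) := by unfold Spec_build_grouped_column_labels_py; infer_instance

-- ===== CLAIM (what is proved, stated in full; the proofs are below) =====
def Claim_equal_build_grouped_column_labels_py : Prop := ∀ (base_column_names : List String), Dom_build_grouped_column_labels_py base_column_names → Spec_build_grouped_column_labels_py base_column_names (build_grouped_column_labels_py base_column_names)

-- ===== LEMMAS AND PROOFS =====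

theorem ports_agree (xs : List String) :
    build_grouped_column_labels_py xs = build_grouped_column_labels_py_alt xs := by
  unfold build_grouped_column_labels_py build_grouped_column_labels_py_alt
  by_cases h0 : xs.length = 0
  · simp [h0]
  · have hn : 0 < xs.length := Nat.pos_of_ne_zero h0
    have hne : (xs.length : Int) ≠ 0 := by exact_mod_cast h0
    simp only [hne, if_false]
    -- rewrite mods of the shifts
    have hm1 : PySem.Int.mod 1 (xs.length : Int) = ((1 % xs.length : Nat) : Int) := by
      exact_mod_cast PySem.Int.mod_natCast 1 xs.length
    have hm3 : PySem.Int.mod 3 (xs.length : Int) = ((3 % xs.length : Nat) : Int) := by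
      exact_mod_cast PySem.Int.mod_natCast 3 xs.length
    rw [hm1, hm3, PySem.List.slice_from_natCast, PySem.List.slice_to_natCast,
        PySem.List.slice_from_natCast, PySem.List.slice_to_natCast,
        ← List.rotate_eq_drop_append_take (Nat.le_of_lt (Nat.mod_lt _ hn)),
        ← List.rotate_eq_drop_append_take (Nat.le_of_lt (Nat.mod_lt _ hn))]
    -- A side to map over range
    rw [PySem.List.pyRange_zero_natCast,
        show (List.foldl (fun grouped_labels idx => grouped_labels ++
          [PySem.List.pyGetD xs (PySem.Int.mod idx (xs.length:Int)) "" ++ " | " ++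
           PySem.List.pyGetD xs (PySem.Int.mod (idx + 1) (xs.length:Int)) "" ++ " | " ++
           PySem.List.pyGetD xs (PySem.Int.mod (idx + 3) (xs.length:Int)) ""]) []) =
          fun L => L.map (fun idx =>
            PySem.List.pyGetD xs (PySem.Int.mod idx (xs.length:Int)) "" ++ " | " ++
            PySem.List.pyGetD xs (PySem.Int.mod (idx + 1) (xs.length:Int)) "" ++ " | " ++
            PySem.List.pyGetD xs (PySem.Int.mod (idx + 3) (xs.length:Int)) "")
        from funext (fun L => by
          simpa using PySem.List.foldl_append_singleton_eq_map
            (fun idx =>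
              PySem.List.pyGetD xs (PySem.Int.mod idx (xs.length:Int)) "" ++ " | " ++
              PySem.List.pyGetD xs (PySem.Int.mod (idx + 1) (xs.length:Int)) "" ++ " | " ++
              PySem.List.pyGetD xs (PySem.Int.mod (idx + 3) (xs.length:Int)) "") L [])]
    simp only [List.map_map]
    apply List.ext_getElem
    · simp
    · intro i h1 h2
      simp only [List.getElem_map, List.getElem_range, List.getElem_zip,
        List.getElem_rotate]
      simp only [List.length_map, List.length_range] at h1
      simp only [Function.comp]
      have e0 : PySem.Int.mod (i : Int) (xs.length:Int) = ((i % xs.length : Nat) : Int) := by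
        exact_mod_cast PySem.Int.mod_natCast i xs.length
      have e1 : PySem.Int.mod ((i : Int) + 1) (xs.length:Int) = (((i+1) % xs.length : Nat) : Int) := by
        exact_mod_cast PySem.Int.mod_natCast (i+1) xs.length
      have e3 : PySem.Int.mod ((i : Int) + 3) (xs.length:Int) = (((i+3) % xs.length : Nat) : Int) := by
        exact_mod_cast PySem.Int.mod_natCast (i+3) xs.length
      rw [e0, e1, e3]
      simp only [PySem.List.pyGetD_natCast]
      rw [List.getD_eq_getElem _ _ (Nat.mod_lt _ hn),
          List.getD_eq_getElem _ _ (Nat.mod_lt _ hn),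
          List.getD_eq_getElem _ _ (Nat.mod_lt _ hn)]
      rw [getElem_congr rfl (Nat.mod_eq_of_lt h1),
          getElem_congr rfl (Nat.add_mod_mod i 1 xs.length).symm,
          getElem_congr rfl (Nat.add_mod_mod i 3 xs.length).symm]

-- ===== VERDICT (by name: the statement is the Claim_ definition above) =====
theorem build_grouped_column_labels_py_spec : Claim_equal_build_grouped_column_labels_py := by
  intro xs _
  exact ports_agree xs
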